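-- pv_equiv track=rewrite | github.com/taggedzi/Repo-Interrogator | src/repo_mcp/index/manager.py | _normalize_path_prefix
-- ===== SOURCE A (Python) =====
-- def _normalize_path_prefix(path_prefix: str | None) -> str | None:
--     if not isinstance(path_prefix, str):
--         return None
--     normalized = path_prefix.replace("\\", "/").strip()
--     while "//" in normalized:
--         normalized = normalized.replace("//", "/")
--     while normalized.startswith("./"):
--         normalized = normalized[2:]
--     return normalized
-- ===== SOURCE B (Python) =====
-- def _normalize_path_prefix(path_prefix):
--     if not isinstance(path_prefix, str):
--         return None
--     s = path_prefix.replace("\\", "/").strip()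
--     out = []
--     for ch in s:
--         if ch == "/" and out and out[-1] == "/":
--             continue
--         out.append(ch)
--     s = "".join(out)
--     i = 0
--     while s.startswith("./", i):
--         i += 2
--     return s[i:]
-- ===== Notes on version B (the rewrite author's own statement) =====
-- stated objective: alternative
-- what changed: Replaces A's two repeat-until-stable rescans (replacing double slashes until none remain, and repeatedly testing-and-slicing off a leading dot-slash) with one left-to-right character pass that skips a slash whenever the last emitted character is a slash, plus a single index advance over leading dot-slash groups followed by one slice.
import Mathlib
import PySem

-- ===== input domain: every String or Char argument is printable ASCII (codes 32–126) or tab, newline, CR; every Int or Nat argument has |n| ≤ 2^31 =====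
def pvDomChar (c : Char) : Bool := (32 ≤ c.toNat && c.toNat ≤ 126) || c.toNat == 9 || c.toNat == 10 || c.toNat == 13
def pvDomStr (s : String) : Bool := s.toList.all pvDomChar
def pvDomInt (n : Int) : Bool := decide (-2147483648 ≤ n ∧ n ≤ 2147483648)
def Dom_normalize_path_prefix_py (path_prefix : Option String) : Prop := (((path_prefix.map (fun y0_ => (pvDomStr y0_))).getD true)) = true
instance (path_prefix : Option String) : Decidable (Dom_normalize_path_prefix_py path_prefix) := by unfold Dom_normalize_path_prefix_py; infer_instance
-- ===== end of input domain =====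

-- B replaces A's two repeat-until-stable rescans with one left-to-right collapsing pass
-- and a single index advance over leading "./" groups; equivalence is proved for all inputs.

-- pvRep: one non-overlapping left-to-right pass of str.replace("//","/"); used to prove
-- termination of A's while-loop port (the length strictly decreases while "//" occurs).
def pvRep : List Char → List Char
  | [] => []
  | [c] => [c]
  | a :: b :: t => if a = '/' ∧ b = '/' then '/' :: pvRep t else a :: pvRep (b :: t)

theorem pvReplace_go_eq (fuel : Nat) (l acc : List Char) (h : l.length ≤ fuel) :
    PySem.Chars.replace.go ['/', '/'] ['/'] fuel l acc = acc.reverse ++ pvRep l := by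
  induction fuel generalizing l acc with
  | zero =>
    have : l = [] := by cases l <;> simp_all
    subst this; simp [PySem.Chars.replace.go, pvRep]
  | succ n ih =>
    match l with
    | [] => simp [PySem.Chars.replace.go, pvRep]
    | [c] =>
      rw [PySem.Chars.replace.go]
      have hthis : ¬ (['/', '/'].isPrefixOf [c] = true) := by simp [List.isPrefixOf]
      rw [if_neg hthis]
      rw [ih [] (c :: acc) (by simp)]
      simp [pvRep]
    | a :: b :: t =>
      rw [PySem.Chars.replace.go]
      by_cases hab : a = '/' ∧ b = '/'
      · obtain ⟨ha, hb⟩ := hab; subst ha; subst hb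
        have hp : ['/', '/'].isPrefixOf ('/' :: '/' :: t) = true := by
          simp [List.isPrefixOf]
        rw [if_pos hp]
        rw [show List.drop ['/','/'].length ('/' :: '/' :: t) = t from rfl]
        rw [ih t (['/'].reverse ++ acc) (by simp at h ⊢; omega)]
        simp [pvRep]
      · have hp : ¬ (['/', '/'].isPrefixOf (a :: b :: t) = true) := by
          intro hx
          have := List.isPrefixOf_iff_prefix.mp hx
          rw [List.cons_prefix_cons] at this
          obtain ⟨h1, h2⟩ := this
          rw [List.cons_prefix_cons] at h2
          exact hab ⟨h1.symm, h2.1.symm⟩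
        rw [if_neg hp]
        rw [ih (b :: t) (a :: acc) (by simp at h ⊢; omega)]
        simp [pvRep, hab]

theorem pvReplace_eq_rep (s : List Char) :
    PySem.Chars.replace s ['/', '/'] ['/'] = pvRep s := by
  rw [PySem.Chars.replace]
  rw [if_neg (by simp : ¬ ((['/', '/'] : List Char).isEmpty = true))]
  exact pvReplace_go_eq s.length s [] le_rfl

theorem pvRep_length_le (s : List Char) : (pvRep s).length ≤ s.length := by
  induction s using pvRep.induct with
  | case1 => simp [pvRep]
  | case2 c => simp [pvRep]
  | case3 a b t hab ih => simp [pvRep, hab]; omega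
  | case4 a b t hab ih => simp [pvRep, hab] at ih ⊢; omega

theorem pvRep_length_lt (s : List Char) (h : ['/', '/'] <:+: s) :
    (pvRep s).length < s.length := by
  induction s using pvRep.induct with
  | case1 => simp at h
  | case2 c =>
    exfalso
    have := h.length_le; simp at this
  | case3 a b t hab ih =>
    have := pvRep_length_le t
    simp [pvRep, hab]; omega
  | case4 a b t hab ih =>
    have hinf : ['/', '/'] <:+: b :: t := by
      rcases List.infix_cons_iff.mp h with hpre | hinf
      · rw [List.cons_prefix_cons] at hpre
        obtain ⟨ha, hpre⟩ := hpre
        rw [List.cons_prefix_cons] at hpre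
        exact absurd ⟨ha.symm, hpre.1.symm⟩ hab
      · exact hinf
    have h3 := ih hinf
    simp only [pvRep, hab, if_false, reduceIte, List.length_cons] at h3 ⊢
    omega

-- ===== PORT A =====
-- A's `while "//" in normalized: normalized = normalized.replace("//", "/")`
def pvCollapseA (s : List Char) : List Char :=
  if h : PySem.Chars.isIn ['/', '/'] s then
    pvCollapseA (PySem.Chars.replace s ['/', '/'] ['/'])
  else s
termination_by s.length
decreasing_by
  rw [pvReplace_eq_rep]
  exact pvRep_length_lt s ((PySem.Chars.isIn_iff_infix _ _).mp h)

-- A's `while normalized.startswith("./"): normalized = normalized[2:]`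
def pvDotsA (s : List Char) : List Char :=
  if h : PySem.Chars.startswith s ['.', '/'] then
    pvDotsA (PySem.List.slice s (some 2) none)
  else s
termination_by s.length
decreasing_by
  have hp : ['.', '/'] <+: s := (PySem.Chars.startswith_iff _ _).mp h
  have h2 : 2 ≤ s.length := by simpa using hp.length_le
  rw [PySem.List.slice_from s (by norm_num : (0:Int) ≤ 2)]
  simp; omega

def normalize_path_prefix_py (path_prefix : Option String) : Option String :=
  match path_prefix with
  | none => none
  | some s =>
      some (String.mk (pvDotsA (pvCollapseA
        (PySem.Chars.strip (PySem.Chars.replace s.toList ['\\'] ['/'])))))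

-- ===== PORT B =====
-- B's loop body: `if ch == "/" and out and out[-1] == "/": continue; out.append(ch)`
def pvColStep (out : List Char) (c : Char) : List Char :=
  if c = '/' ∧ out.getLast? = some '/' then out else out ++ [c]

-- B's `i = 0; while s.startswith("./", i): i += 2` — s.startswith(p, i) with 0 ≤ i ≤ len(s)
-- is exactly p.isPrefixOf (s.drop i) (hand port, exact on that range).
def pvDotIdx (s : List Char) (i : Nat) : Nat :=
  if h : ['.', '/'].isPrefixOf (s.drop i) then pvDotIdx s (i + 2) else i
termination_by s.length - i
decreasing_by
  have hp : ['.', '/'] <+: s.drop i := List.isPrefixOf_iff_prefix.mp h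
  have h2 : 2 ≤ (s.drop i).length := by simpa using hp.length_le
  simp at h2; omega

def normalize_path_prefix_py_alt (path_prefix : Option String) : Option String :=
  match path_prefix with
  | none => none
  | some s =>
      let s1 := PySem.Chars.strip (PySem.Chars.replace s.toList ['\\'] ['/'])
      let out := s1.foldl pvColStep []
      some (String.mk (PySem.List.slice out (some (pvDotIdx out 0 : Int)) none))

-- ===== PRECONDITION & SPEC =====
def Spec_normalize_path_prefix_py (path_prefix : Option String) (out : Option String) : Prop := out = normalize_path_prefix_py_alt path_prefix
instance (path_prefix : Option String) (out : Option String) : Decidable (Spec_normalize_path_prefix_py path_prefix out) := by unfold Spec_normalize_path_prefix_py; infer_instance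

-- ===== CLAIM (what is proved, stated in full; the proofs are below) =====
def Claim_equal_normalize_path_prefix_py : Prop := ∀ (path_prefix : Option String), Dom_normalize_path_prefix_py path_prefix → Spec_normalize_path_prefix_py path_prefix (normalize_path_prefix_py path_prefix)

-- ===== LEMMAS AND PROOFS =====

-- Functional form of B's collapsing pass: `o` is the last emitted character (if any).
def pvColF : Option Char → List Char → List Char
  | _, [] => []
  | o, c :: t => if c = '/' ∧ o = some '/' then pvColF o t else c :: pvColF (some c) t

theorem pvFoldl_colStep (l acc : List Char) :
    List.foldl pvColStep acc l = acc ++ pvColF acc.getLast? l := by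
  induction l generalizing acc with
  | nil => simp [pvColF]
  | cons c t ih =>
    simp only [List.foldl_cons]
    by_cases h : c = '/' ∧ acc.getLast? = some '/'
    · rw [show pvColStep acc c = acc from by simp [pvColStep, h]]
      rw [ih acc]
      simp [pvColF, h]
    · rw [show pvColStep acc c = acc ++ [c] from by simp [pvColStep, h]]
      rw [ih (acc ++ [c])]
      simp [pvColF, h, List.getLast?_concat]

theorem pvColF_rep (s : List Char) (o : Option Char) :
    pvColF o (pvRep s) = pvColF o s := by
  induction s using pvRep.induct generalizing o with
  | case1 => simp [pvRep]
  | case2 c => simp [pvRep]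
  | case3 a b t hab ih =>
    obtain ⟨ha, hb⟩ := hab; subst ha; subst hb
    by_cases ho : o = some '/'
    · simp [pvRep, pvColF, ho, ih]
    · simp [pvRep, pvColF, ho, ih]
  | case4 a b t hab ih =>
    by_cases hc : a = '/' ∧ o = some '/'
    · have hb : ¬ (b = '/') := fun hb => hab ⟨hc.1, hb⟩
      simp [pvRep, pvColF, hc, hb, ih]
    · simp [pvRep, pvColF, hab, hc, ih]

theorem pvColF_id (s : List Char) (o : Option Char)
    (hinf : ¬ (['/', '/'] <:+: s))
    (ho : o = some '/' → s.head? ≠ some '/') :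
    pvColF o s = s := by
  induction s generalizing o with
  | nil => simp [pvColF]
  | cons c t ih =>
    have hskip : ¬ (c = '/' ∧ o = some '/') := by
      rintro ⟨hc, hoo⟩
      exact ho hoo (by simp [hc])
    simp only [pvColF, hskip, if_neg, reduceIte]
    rw [ih (some c)]
    · intro h; exact hinf (List.infix_cons_iff.mpr (Or.inr h))
    · intro hc ht
      apply hinf
      apply List.infix_cons_iff.mpr
      left
      cases t with
      | nil => simp at ht
      | cons b t' =>
        simp at ht hc
        simp [List.cons_prefix_cons, hc, ht]

theorem pvCollapseA_eq_colF (s : List Char) : pvCollapseA s = pvColF none s := by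
  induction s using pvCollapseA.induct with
  | case1 s h ih =>
    rw [pvCollapseA]
    simp only [h, dif_pos]
    rw [ih, pvReplace_eq_rep, pvColF_rep]
  | case2 s h =>
    rw [pvCollapseA]
    simp only [h, Bool.false_eq_true, dif_neg, not_false_iff]
    rw [pvColF_id s none _ (by simp)]
    simp only [Bool.not_eq_true] at h
    exact (PySem.Chars.isIn_eq_false_iff _ _).mp h

theorem pvDotsA_drop (s : List Char) (i : Nat) :
    pvDotsA (s.drop i) = s.drop (pvDotIdx s i) := by
  induction i using pvDotIdx.induct s with
  | case1 i h ih =>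
    rw [pvDotsA]
    have hsw : PySem.Chars.startswith (s.drop i) ['.', '/'] = true :=
      (PySem.Chars.startswith_iff _ _).mpr (List.isPrefixOf_iff_prefix.mp h)
    rw [dif_pos hsw]
    rw [PySem.List.slice_from _ (by norm_num : (0:Int) ≤ 2)]
    rw [show ((2:Int).toNat) = 2 from rfl, List.drop_drop]
    rw [ih]
    conv_rhs => rw [pvDotIdx, dif_pos h]
  | case2 i h =>
    rw [pvDotsA]
    have hsw : ¬ (PySem.Chars.startswith (s.drop i) ['.', '/'] = true) := by
      rw [PySem.Chars.startswith_iff]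
      intro hp; exact h (List.isPrefixOf_iff_prefix.mpr hp)
    rw [dif_neg hsw]
    rw [pvDotIdx, dif_neg h]

-- ===== VERDICT (by name: the statement is the Claim_ definition above) =====
theorem normalize_path_prefix_py_spec : Claim_equal_normalize_path_prefix_py := by
  intro p _
  unfold Spec_normalize_path_prefix_py
  match p with
  | none => rfl
  | some s =>
    unfold normalize_path_prefix_py normalize_path_prefix_py_alt
    simp only
    set u := PySem.Chars.strip (PySem.Chars.replace s.toList ['\\'] ['/']) with hu
    rw [pvFoldl_colStep u []]
    simp only [List.nil_append, List.getLast?_nil]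
    rw [← pvCollapseA_eq_colF]
    rw [PySem.List.slice_from _ (by positivity)]
    rw [Int.toNat_natCast]
    exact congrArg (some ∘ String.mk) (by
      have := pvDotsA_drop (pvCollapseA u) 0
      simpa using this)
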